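-- pv_equiv track=rewrite | github.com/pradipsenapati077-cmd/Audio-to-Image-watermarking | new.py | lsb_extract
-- ===== SOURCE A (Python) =====
-- def lsb_extract(signal, b, num_bits):
--     mask = (1 << b) - 1
--     bits = []
--     num_samples_needed = (num_bits + b - 1) // b
--     for i in range(num_samples_needed):
--         val = signal[i] & mask
--         bits.append(f"{val:0{b}b}")
--     bits_str = "".join(bits)
--     return bits_str[:num_bits]
-- ===== SOURCE B (Python) =====
-- def lsb_extract(sig, b, num_bits):
--     # One flat loop over output bit positions: bit j comes from sample j//b,
--     # offset j%b from the top of that sample's b-bit group.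
--     out = []
--     for j in range(num_bits):
--         shift = b - 1 - j % b
--         out.append(str((sig[j // b] >> shift) & 1))
--     return "".join(out)
-- ===== Notes on version B (the rewrite author's own statement) =====
-- stated objective: alternative
-- what changed: A formats each needed sample's low b bits as a zero-padded binary string, joins the group strings and truncates; B runs one flat loop over output bit positions j, picking sample j//b and bit b-1-j%b by shift-and-mask, with no group strings, no join and no truncation.
import Mathlib
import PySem

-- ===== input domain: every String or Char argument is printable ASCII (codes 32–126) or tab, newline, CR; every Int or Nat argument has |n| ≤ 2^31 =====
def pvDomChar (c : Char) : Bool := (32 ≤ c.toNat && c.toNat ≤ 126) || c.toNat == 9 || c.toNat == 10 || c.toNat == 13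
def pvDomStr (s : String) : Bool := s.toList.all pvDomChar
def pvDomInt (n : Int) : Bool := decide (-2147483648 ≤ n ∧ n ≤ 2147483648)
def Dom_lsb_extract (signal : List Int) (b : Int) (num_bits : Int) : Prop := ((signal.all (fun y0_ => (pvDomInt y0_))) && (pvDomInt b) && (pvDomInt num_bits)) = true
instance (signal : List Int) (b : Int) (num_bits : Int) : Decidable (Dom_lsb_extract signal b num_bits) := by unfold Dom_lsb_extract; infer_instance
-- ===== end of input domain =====

-- B replaces A's per-sample group-formatting-then-truncate by one flat loop over output
-- bit positions with index arithmetic (objective: alternative decomposition, same cost).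

-- ===== PORT A =====
-- hand port of the f-string `f"{val:0{b}b}"`: fixed-width binary; exact for 0 ≤ v < 2^w
def pvFmtBin (w : Nat) (v : Int) : List Char :=
  (List.range w).map (fun k => if (v / (2:Int)^(w-1-k)) % 2 = 1 then '1' else '0')

def lsb_extract (signal : List Int) (b : Int) (num_bits : Int) : String :=
  -- mask = (1 << b) - 1; `signal[i] & mask` hand-ported as `signal[i] mod 2^b`
  -- (exact: Python's two's-complement & with an all-ones mask of b ≥ 1 bits)
  let N := PySem.Int.floordiv (num_bits + b - 1) b
  let bits := (PySem.List.pyRange 0 N 1).map (fun i =>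
      let val := PySem.Int.mod ((PySem.List.pyGet? signal i).getD 0) ((2:Int)^b.toNat)
      pvFmtBin b.toNat val)
  let bits_str := bits.flatten
  String.mk (PySem.List.slice bits_str none (some num_bits))

-- ===== PORT B =====
def lsb_extract_alt (signal : List Int) (b : Int) (num_bits : Int) : String :=
  -- `x >> shift` hand-ported as `x // 2^shift` (exact for shift ≥ 0, which Pre_ gives);
  -- `& 1` as `mod 2`; `str(bit)` as the character of the 0/1 bit
  String.mk ((PySem.List.pyRange 0 num_bits 1).map (fun j =>
    let shift := b - 1 - PySem.Int.mod j b
    let x := (PySem.List.pyGet? signal (PySem.Int.floordiv j b)).getD 0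
    let bit := PySem.Int.mod (PySem.Int.floordiv x ((2:Int)^shift.toNat)) 2
    if bit = 1 then '1' else '0'))

-- ===== PRECONDITION & SPEC =====
-- Pre_ excludes exactly the inputs where A raises: b ≤ 0 (ZeroDivisionError for b == 0,
-- ValueError for b < 0) and signals shorter than the ceil(num_bits/b) samples read (IndexError).
def Pre_lsb_extract (signal : List Int) (b : Int) (num_bits : Int) : Prop :=
  1 ≤ b ∧ (num_bits ≤ 0 ∨ PySem.Int.floordiv (num_bits + b - 1) b ≤ (signal.length : Int))
instance (signal : List Int) (b : Int) (num_bits : Int) : Decidable (Pre_lsb_extract signal b num_bits) := by unfold Pre_lsb_extract; infer_instance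
def pvWitness_lsb_extract : List Int × Int × Int := ([5, -3, 7], 3, 7)

def Spec_lsb_extract (signal : List Int) (b : Int) (num_bits : Int) (out : String) : Prop := out = lsb_extract_alt signal b num_bits
instance (signal : List Int) (b : Int) (num_bits : Int) (out : String) : Decidable (Spec_lsb_extract signal b num_bits out) := by unfold Spec_lsb_extract; infer_instance

-- ===== CLAIM (what is proved, stated in full; the proofs are below) =====
def Claim_equal_lsb_extract : Prop := ∀ (signal : List Int) (b : Int) (num_bits : Int), Dom_lsb_extract signal b num_bits → Pre_lsb_extract signal b num_bits → Spec_lsb_extract signal b num_bits (lsb_extract signal b num_bits)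

-- ===== LEMMAS AND PROOFS =====

-- masking to the low bb bits does not change bit k (k < bb)
lemma pv_bit_eq (x : Int) (bb k : Nat) (hk : k < bb) :
    (x % (2:Int)^bb) / (2:Int)^(bb-1-k) % 2 = x / (2:Int)^(bb-1-k) % 2 := by
  have hq : (2:Int)^bb = (2:Int)^(bb-1-k) * 2^(k+1) := by
    rw [← pow_add]; congr 1; omega
  have hp : ((2:Int)^(bb-1-k)) ≠ 0 := pow_ne_zero _ two_ne_zero
  obtain ⟨m, hm⟩ : ∃ m, x / (2:Int)^bb = m := ⟨_, rfl⟩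
  have h1 : x % (2:Int)^bb = x + (-m * 2^(k+1)) * (2:Int)^(bb-1-k) := by
    rw [Int.emod_def, hm, hq]; ring
  rw [h1, Int.add_mul_ediv_right _ _ hp]
  obtain ⟨a, ha⟩ : ∃ a, x / (2:Int)^(bb-1-k) = a := ⟨_, rfl⟩
  rw [ha]
  have h2 : (-m * 2^(k+1) : Int) = (-m * 2^k) * 2 := by ring
  rw [h2]
  obtain ⟨t, ht⟩ : ∃ t : Int, (-m * 2^k : Int) = t := ⟨_, rfl⟩
  rw [ht]
  omega

-- flattening N uniform groups of bb characters = one map over N*bb bit positions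
lemma pv_flat_range {α : Type} (bb : Nat) (g : Nat → Nat → α) (N : Nat) :
    (List.range N).flatMap (fun i => (List.range bb).map (g i)) =
    (List.range (N*bb)).map (fun j => g (j / bb) (j % bb)) := by
  induction N with
  | zero => simp
  | succ n ih =>
    rw [List.range_succ, List.flatMap_append, ih, Nat.succ_mul, List.range_add,
      List.map_append, List.map_map]
    congr 1
    simp only [List.flatMap_cons, List.flatMap_nil, List.append_nil]
    apply List.map_congr_left
    intro k hk
    have hkb : k < bb := List.mem_range.mp hk
    have hbb : 0 < bb := by omega
    simp only [Function.comp]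
    have hdiv : (n * bb + k) / bb = n := by
      rw [Nat.add_comm, Nat.add_mul_div_right _ _ hbb, Nat.div_eq_of_lt hkb]; omega
    have hmod : (n * bb + k) % bb = k := by
      rw [Nat.add_comm, Nat.add_mul_mod_self_right, Nat.mod_eq_of_lt hkb]
    rw [hdiv, hmod]

lemma pv_main (signal : List Int) (b nb : Int) (hb : 1 ≤ b) :
    lsb_extract signal b nb = lsb_extract_alt signal b nb := by
  simp only [lsb_extract, lsb_extract_alt]
  obtain ⟨bb, rfl⟩ : ∃ bb : Nat, b = (bb : Int) := ⟨b.toNat, by omega⟩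
  have hbb : 1 ≤ bb := by exact_mod_cast hb
  by_cases hnb : nb ≤ 0
  · -- num_bits ≤ 0: the sample range and the bit range are both empty
    have hN : PySem.Int.floordiv (nb + bb - 1) bb < 1 := by
      rw [PySem.Int.floordiv_lt_iff_lt_mul (by exact_mod_cast hbb)]
      omega
    rw [PySem.List.pyRange_one_eq_nil (by omega), PySem.List.pyRange_one_eq_nil (by omega)]
    simp [PySem.List.slice]
  · obtain ⟨n, rfl⟩ : ∃ n : Nat, nb = (n : Int) := ⟨nb.toNat, by omega⟩
    have hn : 0 < n := by exact_mod_cast (by omega : (0:Int) < n)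
    -- the sample count as a Nat
    have hNcast : ((n:Int) + bb - 1) = (((n + bb - 1 : Nat)) : Int) := by omega
    rw [hNcast, PySem.Int.floordiv_natCast]
    set Nn := (n + bb - 1) / bb with hNn
    have hceil : n ≤ Nn * bb := by
      have h1 := Nat.div_add_mod (n + bb - 1) bb
      have h2 : (n + bb - 1) % bb < bb := Nat.mod_lt _ (by omega)
      have h3 : bb * Nn = Nn * bb := Nat.mul_comm _ _
      simp only [← hNn] at h1 h2
      omega
    rw [PySem.List.pyRange_one 0 (Nn : Int), PySem.List.pyRange_one 0 (n : Int)]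
    simp only [sub_zero, Int.toNat_natCast, zero_add, List.map_map]
    -- A's group i, masked and formatted, is bb characters of plain bit arithmetic
    have hA : ∀ i ∈ List.range Nn,
        ((fun i => pvFmtBin bb
            (PySem.Int.mod ((PySem.List.pyGet? signal i).getD 0) ((2:Int)^bb))) ∘ (fun k : Nat => (k:Int))) i
        = (List.range bb).map (fun k =>
            if (signal.getD i 0 / (2:Int)^(bb-1-k)) % 2 = 1 then '1' else '0') := by
      intro i _
      simp only [Function.comp, PySem.List.pyGet?_natCast]
      have hx : (signal[i]?).getD 0 = signal.getD i 0 := rfl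
      rw [hx, PySem.Int.mod_eq_emod_of_pos (by positivity)]
      unfold pvFmtBin
      apply List.map_congr_left
      intro k hk
      rw [pv_bit_eq _ _ _ (List.mem_range.mp hk)]
    rw [List.map_congr_left hA, ← List.flatMap_def, pv_flat_range,
      PySem.List.slice_to_natCast, ← List.map_take, List.take_range,
      (by omega : min n (Nn*bb) = n)]
    apply congrArg
    apply List.map_congr_left
    intro j hj
    simp only [Function.comp, PySem.Int.mod_natCast, PySem.Int.floordiv_natCast,
      PySem.List.pyGet?_natCast]
    have hjm : j % bb < bb := Nat.mod_lt _ (by omega)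
    have hsh : ((bb:Int) - 1 - ((j % bb : Nat) : Int)).toNat = bb - 1 - j % bb := by omega
    rw [hsh]
    have hx : (signal[j / bb]?).getD 0 = signal.getD (j / bb) 0 := rfl
    rw [hx, PySem.Int.floordiv_eq_ediv_of_pos (by positivity),
      PySem.Int.mod_eq_emod_of_pos (by norm_num)]

-- ===== VERDICT (by name: the statement is the Claim_ definition above) =====
theorem lsb_extract_spec : Claim_equal_lsb_extract := by
  intro signal b num_bits _ hpre
  unfold Spec_lsb_extract
  exact (pv_main signal b num_bits hpre.1)
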